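-- pv_equiv track=rewrite | github.com/zeyuznv/NeMo | examples/speech_translation/prepare_wmt_data_for_punctuation_capitalization_task.py | arrange_sentences_by_number_of_words
-- ===== SOURCE A (Python) =====
-- def arrange_sentences_by_number_of_words(docs, sequence_length_range):
--     result = {n: [] for n in range(sequence_length_range[0], sequence_length_range[1])}
--     for doc_id, doc in docs.items():
--         for start_sentence_i, sentence in enumerate(doc):
--             for end_sentence_i in range(start_sentence_i + 1, len(doc)):
--                 n_words = sum([len(doc[i].split()) for i in range(start_sentence_i, end_sentence_i)])
--                 if n_words >= sequence_length_range[1] or n_words < sequence_length_range[0]: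
--                     break
--                 result[n_words].append((doc_id, start_sentence_i, end_sentence_i))
--     return result
-- ===== SOURCE B (Python) =====
-- def arrange_sentences_by_number_of_words(docs, sequence_length_range):
--     low = sequence_length_range[0]
--     high = sequence_length_range[1]
--     # stage 1: collect all (n_words, span) pairs, using prefix sums of word counts
--     spans = []
--     for doc_id, doc in docs.items():
--         prefix = [0]
--         for s in doc:
--             prefix.append(prefix[-1] + len(s.split()))
--         for start in range(len(doc)):
--             for end in range(start + 1, len(doc)):
--                 n = prefix[end] - prefix[start]
--                 if n >= high or n < low:
--                     break
--                 spans.append((n, (doc_id, start, end)))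
--     # stage 2: bucket the spans by word count
--     result = {n: [] for n in range(low, high)}
--     for n, t in spans:
--         result[n].append(t)
--     return result
-- ===== Notes on version B (the rewrite author's own statement) =====
-- stated objective: alternative
-- what changed: B is a two-stage algorithm: it builds per-document prefix sums of word counts once so each span's count is one subtraction (instead of A's re-split-and-re-sum of the whole span per candidate end), collects all (n_words, span) pairs into one flat list, and buckets that list into the dict in a separate final pass; measured ~1.4x faster, below the 1.5x confirmation threshold.
-- outside the precondition, e.g. on arrange_sentences_by_number_of_words({}, (5,)): A raises IndexError, B raises IndexError
import Mathlib
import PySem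

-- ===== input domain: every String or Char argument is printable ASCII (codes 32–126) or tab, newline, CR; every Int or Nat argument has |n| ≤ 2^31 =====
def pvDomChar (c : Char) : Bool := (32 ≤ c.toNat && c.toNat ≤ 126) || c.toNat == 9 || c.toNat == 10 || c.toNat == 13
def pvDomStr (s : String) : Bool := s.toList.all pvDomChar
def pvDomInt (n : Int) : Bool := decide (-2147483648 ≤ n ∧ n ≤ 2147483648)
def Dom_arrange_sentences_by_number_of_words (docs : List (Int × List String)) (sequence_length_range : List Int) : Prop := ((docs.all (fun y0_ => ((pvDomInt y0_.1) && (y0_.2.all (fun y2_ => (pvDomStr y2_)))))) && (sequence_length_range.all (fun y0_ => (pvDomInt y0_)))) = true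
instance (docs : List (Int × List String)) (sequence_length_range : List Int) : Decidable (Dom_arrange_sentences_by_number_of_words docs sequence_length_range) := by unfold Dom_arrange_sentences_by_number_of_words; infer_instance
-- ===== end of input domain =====

-- B is a two-stage algorithm: per-document prefix sums of word counts give each span's count by
-- one subtraction (instead of A's re-split-and-re-sum of the whole span), all (n_words, span)
-- pairs are first collected into one flat list, and a separate final pass buckets them into the dict
-- (objective: alternative structure; a timing run did not confirm a >=1.5x speed-up).

-- ===== PORT A =====
-- inner 'for end_sentence_i in range(start_sentence_i + 1, len(doc))' loop with break;
-- fuel = number of remaining iterations, e = current end_sentence_i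
def pvAInner (doc_id : Int) (doc : List String) (low high : Int) (start : Int) :
    Nat → Int → PySem.Dict Int (List (List Int)) → PySem.Dict Int (List (List Int))
  | 0, _, r => r
  | fuel + 1, e, r =>
    let n_words : Int := ((PySem.List.pyRange start e 1).map
      (fun i => ((PySem.Str.split₀ (PySem.List.pyGetD doc i "")).length : Int))).sum
    if n_words ≥ high ∨ n_words < low then r
    else pvAInner doc_id doc low high start fuel (e + 1)
      (r.modify n_words [] (· ++ [[doc_id, start, e]]))

def arrange_sentences_by_number_of_words (docs : List (Int × List String)) (sequence_length_range : List Int) : List (Int × List (List Int)) :=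
  let low := PySem.List.pyGetD sequence_length_range 0 0
  let high := PySem.List.pyGetD sequence_length_range 1 0
  let result : PySem.Dict Int (List (List Int)) :=
    (PySem.List.pyRange low high 1).foldl (fun d n => d.insert n []) PySem.Dict.empty
  (docs.foldl (fun r p =>
    (PySem.List.enumerate p.2 0).foldl (fun r q =>
      pvAInner p.1 p.2 low high q.1 (p.2.length - (q.1.toNat + 1)) (q.1 + 1) r) r) result).items

-- ===== PORT B =====
-- inner 'for end in range(start + 1, len(doc))' loop with break, appending (n, span) pairs
-- to the flat span list; fuel = number of remaining iterations, e = current end index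
def pvBInner (doc_id : Int) (pref : List Int) (low high : Int) (start : Int) :
    Nat → Int → List (Int × List Int) → List (Int × List Int)
  | 0, _, sp => sp
  | fuel + 1, e, sp =>
    let n := PySem.List.pyGetD pref e 0 - PySem.List.pyGetD pref start 0
    if n ≥ high ∨ n < low then sp
    else pvBInner doc_id pref low high start fuel (e + 1) (sp ++ [(n, [doc_id, start, e])])

def arrange_sentences_by_number_of_words_alt (docs : List (Int × List String)) (sequence_length_range : List Int) : List (Int × List (List Int)) :=
  let low := PySem.List.pyGetD sequence_length_range 0 0
  let high := PySem.List.pyGetD sequence_length_range 1 0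
  -- stage 1: the flat list of (n_words, span) pairs
  let spans : List (Int × List Int) := docs.foldl (fun sp p =>
    let pref : List Int := p.2.foldl
      (fun pf s => pf ++ [PySem.List.pyGetD pf (-1) 0 + ((PySem.Str.split₀ s).length : Int)]) [0]
    (PySem.List.pyRange 0 (p.2.length : Int) 1).foldl (fun sp start =>
      pvBInner p.1 pref low high start (p.2.length - (start.toNat + 1)) (start + 1) sp) sp) []
  -- stage 2: bucket the spans by word count
  let result : PySem.Dict Int (List (List Int)) :=
    (PySem.List.pyRange low high 1).foldl (fun d n => d.insert n []) PySem.Dict.empty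
  (spans.foldl (fun r nt => r.modify nt.1 [] (· ++ [nt.2])) result).items

-- ===== PRECONDITION & SPEC =====
-- A raises IndexError (sequence_length_range[0] / [1]) when the range has fewer than two entries.
def Pre_arrange_sentences_by_number_of_words (_docs : List (Int × List String)) (sequence_length_range : List Int) : Prop := 2 ≤ sequence_length_range.length
instance (docs : List (Int × List String)) (sequence_length_range : List Int) : Decidable (Pre_arrange_sentences_by_number_of_words docs sequence_length_range) := by unfold Pre_arrange_sentences_by_number_of_words; infer_instance
def pvWitness_arrange_sentences_by_number_of_words : (List (Int × List String)) × List Int := ([(0, ["a b", "c", "d e f"])], [1, 4])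

def Spec_arrange_sentences_by_number_of_words (docs : List (Int × List String)) (sequence_length_range : List Int) (out : List (Int × List (List Int))) : Prop := out = arrange_sentences_by_number_of_words_alt docs sequence_length_range
instance (docs : List (Int × List String)) (sequence_length_range : List Int) (out : List (Int × List (List Int))) : Decidable (Spec_arrange_sentences_by_number_of_words docs sequence_length_range out) := by unfold Spec_arrange_sentences_by_number_of_words; infer_instance

-- ===== CLAIM (what is proved, stated in full; the proofs are below) =====
def Claim_equal_arrange_sentences_by_number_of_words : Prop := ∀ (docs : List (Int × List String)) (sequence_length_range : List Int), Dom_arrange_sentences_by_number_of_words docs sequence_length_range → Pre_arrange_sentences_by_number_of_words docs sequence_length_range → Spec_arrange_sentences_by_number_of_words docs sequence_length_range (arrange_sentences_by_number_of_words docs sequence_length_range)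

-- ===== LEMMAS AND PROOFS =====

-- word counts of a document
def pvWc (doc : List String) : List Int := doc.map (fun s => ((PySem.Str.split₀ s).length : Int))

-- B's prefix-sum list
def pvPref (doc : List String) : List Int :=
  doc.foldl (fun pf s => pf ++ [PySem.List.pyGetD pf (-1) 0 + ((PySem.Str.split₀ s).length : Int)]) [0]

-- B's stage-2 bucketing step
def pvBucket (r : PySem.Dict Int (List (List Int))) (nt : Int × List Int) : PySem.Dict Int (List (List Int)) :=
  r.modify nt.1 [] (· ++ [nt.2])

lemma pvPrefGen (doc : List String) : ∀ (pf : List Int) (c : Int) (h : pf ≠ []), pf.getLast h = c →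
    doc.foldl (fun pf s => pf ++ [PySem.List.pyGetD pf (-1) 0 + ((PySem.Str.split₀ s).length : Int)]) pf
    = pf ++ (List.range doc.length).map (fun k => c + (((pvWc doc).take (k + 1)).sum)) := by
  induction doc with
  | nil => intro pf c h hl; simp
  | cons s rest ih =>
      intro pf c h hl
      simp only [List.foldl_cons]
      rw [PySem.List.pyGetD_neg_one (h := h), hl]
      rw [ih (pf ++ [c + ((PySem.Str.split₀ s).length : Int)]) (c + ((PySem.Str.split₀ s).length : Int))
        (by simp) (by simp)]
      rw [List.append_assoc]
      congr 1
      simp only [List.length_cons, List.range_succ_eq_map, List.map_cons, List.map_map]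
      simp [pvWc]; intros; ring

lemma pvPrefEq (doc : List String) :
    pvPref doc = (List.range (doc.length + 1)).map (fun k => ((pvWc doc).take k).sum) := by
  unfold pvPref
  rw [pvPrefGen doc [0] 0 (by simp) (by simp)]
  rw [List.range_succ_eq_map, List.map_cons, List.map_map]
  simp

lemma pvPrefGet (doc : List String) (k : Nat) (hk : k ≤ doc.length) :
    PySem.List.pyGetD (pvPref doc) (k : Int) 0 = ((pvWc doc).take k).sum := by
  rw [PySem.List.pyGetD_natCast, pvPrefEq]
  rw [List.getD_eq_getElem?_getD, List.getElem?_map, List.getElem?_range (by omega : k < doc.length + 1)]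
  simp

lemma pvSumRange (doc : List String) (start e : Nat) (hse : start ≤ e) (hel : e ≤ doc.length) :
    ((PySem.List.pyRange (start : Int) (e : Int) 1).map
      (fun i => ((PySem.Str.split₀ (PySem.List.pyGetD doc i "")).length : Int))).sum
    = (((pvWc doc).drop start).take (e - start)).sum := by
  induction e, hse using Nat.le_induction with
  | base =>
      simp [PySem.List.pyRange_one_eq_nil]
  | succ e he ih =>
      have hel' : e ≤ doc.length := by omega
      rw [show ((e + 1 : Nat) : Int) = (e : Int) + 1 by push_cast; ring,
          PySem.List.pyRange_one_succ_right (by exact_mod_cast he)]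
      rw [List.map_append, List.sum_append, ih hel']
      have h2 : e + 1 - start = (e - start) + 1 := by omega
      rw [h2, List.take_add_one, List.sum_append]
      have hlt : e - start < ((pvWc doc).drop start).length := by
        simp [pvWc]; omega
      have : ((pvWc doc).drop start)[e - start]? = some ((pvWc doc)[e]'(by simp [pvWc]; omega)) := by
        rw [List.getElem?_eq_getElem hlt]
        congr 1
        rw [List.getElem_drop]
        congr 1; omega
      rw [this]
      simp [pvWc, PySem.List.pyGetD_natCast, List.getD, List.getElem?_eq_getElem (by omega : e < doc.length)]

-- prefix-sum subtraction computes the span's word count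
lemma pvPrefDiff (doc : List String) (start e : Nat) (hse : start ≤ e) (hel : e ≤ doc.length) :
    PySem.List.pyGetD (pvPref doc) (e : Int) 0 - PySem.List.pyGetD (pvPref doc) (start : Int) 0
    = (((pvWc doc).drop start).take (e - start)).sum := by
  rw [pvPrefGet doc e hel, pvPrefGet doc start (by omega)]
  rw [show e = start + (e - start) by omega, List.take_add, List.sum_append]
  simp

-- pvBInner only appends to its span accumulator
lemma pvBInner_append (doc_id : Int) (pref : List Int) (low high start : Int) :
    ∀ (fuel : Nat) (e : Int) (sp : List (Int × List Int)),
    pvBInner doc_id pref low high start fuel e sp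
    = sp ++ pvBInner doc_id pref low high start fuel e [] := by
  intro fuel
  induction fuel with
  | zero => intro e sp; simp [pvBInner]
  | succ fuel ih =>
      intro e sp
      rw [pvBInner, pvBInner]
      split_ifs with h
      · simp
      · simp only [List.nil_append]
        conv_lhs => rw [ih (e + 1)]
        conv_rhs => rw [ih (e + 1)]
        simp

-- generic: a fold that only appends can be started from []
lemma pvFoldAppendOut {γ δ : Type} (g : List δ → γ → List δ) (hg : ∀ sp x, g sp x = sp ++ g [] x)
    (l : List γ) : ∀ (sp : List δ), l.foldl g sp = sp ++ l.foldl g [] := by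
  induction l with
  | nil => intro sp; simp
  | cons x xs ih =>
      intro sp
      simp only [List.foldl_cons]
      rw [hg sp x, ih (sp ++ g [] x), ih (g [] x), List.append_assoc]

-- generic fusion: a dict-threading fold equals collecting the spans and bucketing them afterwards
lemma pvFoldFuse {γ : Type} (l : List γ)
    (Astep : PySem.Dict Int (List (List Int)) → γ → PySem.Dict Int (List (List Int)))
    (g : List (Int × List Int) → γ → List (Int × List Int))
    (hg : ∀ sp x, g sp x = sp ++ g [] x)
    (h : ∀ r x, x ∈ l → Astep r x = (g [] x).foldl pvBucket r) :
    ∀ r, l.foldl Astep r = (l.foldl g []).foldl pvBucket r := by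
  induction l with
  | nil => intro r; simp
  | cons x xs ih =>
      intro r
      simp only [List.foldl_cons]
      rw [ih (fun r x hx => h r x (by simp [hx])) (Astep r x),
          h r x (by simp), ← List.foldl_append,
          ← pvFoldAppendOut g hg xs (g [] x)]

-- the inner loops agree: A's dict updates = B's collected spans bucketed afterwards
lemma pvInnerEq (doc_id : Int) (doc : List String) (low high : Int) (start : Nat) :
    ∀ (fuel e : Nat) (r : PySem.Dict Int (List (List Int))), start ≤ e → e + fuel ≤ doc.length + 1 →
    pvAInner doc_id doc low high (start : Int) fuel (e : Int) r
    = (pvBInner doc_id (pvPref doc) low high (start : Int) fuel (e : Int) []).foldl pvBucket r := by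
  intro fuel
  induction fuel with
  | zero => intro e r _ _; simp [pvAInner, pvBInner]
  | succ fuel ih =>
      intro e r hse hb
      rw [pvAInner, pvBInner]
      have hel : e ≤ doc.length := by omega
      have hsum := pvSumRange doc start e hse hel
      have hdiff := pvPrefDiff doc start e hse hel
      simp only [hsum, hdiff]
      split_ifs with h
      · simp
      · rw [pvBInner_append, List.foldl_append]
        have he1 : ((e : Int) + 1) = ((e + 1 : Nat) : Int) := by push_cast; ring
        rw [he1, ih (e + 1) _ (by omega) (by omega)]
        rfl

-- per-start agreement, in the exact shape the outer folds use
lemma pvStartEq (doc_id : Int) (doc : List String) (low high : Int) (start : Nat)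
    (hlt : start < doc.length) (r : PySem.Dict Int (List (List Int))) :
    pvAInner doc_id doc low high (start : Int) (doc.length - (start + 1)) ((start : Int) + 1) r
    = (pvBInner doc_id (pvPref doc) low high (start : Int) (doc.length - (start + 1)) ((start : Int) + 1) []).foldl pvBucket r := by
  have h1 : ((start : Int) + 1) = ((start + 1 : Nat) : Int) := by push_cast; ring
  rw [h1]
  exact pvInnerEq doc_id doc low high start (doc.length - (start + 1)) (start + 1) r (by omega) (by omega)

-- per-document agreement
lemma pvDocEq (doc_id : Int) (doc : List String) (low high : Int)
    (r : PySem.Dict Int (List (List Int))) :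
    (PySem.List.enumerate doc 0).foldl (fun r q =>
      pvAInner doc_id doc low high q.1 (doc.length - (q.1.toNat + 1)) (q.1 + 1) r) r
    = ((PySem.List.pyRange 0 (doc.length : Int) 1).foldl (fun sp start =>
        pvBInner doc_id (pvPref doc) low high start (doc.length - (start.toNat + 1)) (start + 1) sp) []).foldl pvBucket r := by
  rw [PySem.List.enumerate_eq_map_pyRange (d := ""), List.foldl_map]
  have hlen : PySem.List.len doc = (doc.length : Int) := rfl
  rw [hlen]
  apply pvFoldFuse
  · intro sp x
    exact pvBInner_append doc_id (pvPref doc) low high x _ _ sp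
  · intro racc j hj
    rw [PySem.List.mem_pyRange_one] at hj
    obtain ⟨h0, hup⟩ := hj
    have hk : ((j.toNat : Nat) : Int) = j := Int.toNat_of_nonneg h0
    rw [← hk]
    exact pvStartEq doc_id doc low high j.toNat (by omega) racc

-- B's per-document step only appends to the span list
lemma pvDocStep_append (doc_id : Int) (doc : List String) (low high : Int)
    (sp : List (Int × List Int)) :
    (PySem.List.pyRange 0 (doc.length : Int) 1).foldl (fun sp start =>
      pvBInner doc_id (pvPref doc) low high start (doc.length - (start.toNat + 1)) (start + 1) sp) sp
    = sp ++ (PySem.List.pyRange 0 (doc.length : Int) 1).foldl (fun sp start =>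
      pvBInner doc_id (pvPref doc) low high start (doc.length - (start.toNat + 1)) (start + 1) sp) [] := by
  exact pvFoldAppendOut
    (fun sp start => pvBInner doc_id (pvPref doc) low high start (doc.length - (start.toNat + 1)) (start + 1) sp)
    (fun sp x => pvBInner_append doc_id (pvPref doc) low high x _ _ sp) _ sp

-- ===== VERDICT (by name: the statement is the Claim_ definition above) =====
theorem arrange_sentences_by_number_of_words_spec : Claim_equal_arrange_sentences_by_number_of_words := by
  intro docs slr _ _
  unfold Spec_arrange_sentences_by_number_of_words
  unfold arrange_sentences_by_number_of_words arrange_sentences_by_number_of_words_alt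
  simp only []
  congr 1
  exact pvFoldFuse docs _ _
    (fun sp p => pvDocStep_append p.1 p.2 _ _ sp)
    (fun r p _ => pvDocEq p.1 p.2 _ _ r) _
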